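-- pv_equiv track=rewrite | github.com/justinlietz93/crux | crux_providers/service/cli/cli_shell.py | _parse_stream_args
-- ===== SOURCE A (Python) =====
-- from typing import Any, Dict, Optional, Tuple
--
-- def _parse_stream_args(tokens: list[str]) -> Tuple[Optional[str], Optional[str]]:
--     """Extract optional stream and live tokens from a token list."""
--     st = lv = None
--     for t in tokens:
--         tl = t.lower()
--         if tl in {"on", "off", "true", "false", "live", "nolive", "y", "n", "1", "0"}:
--             if tl in {"live", "nolive"}:
--                 lv = tl
--             else:
--                 st = tl
--     return st, lv
-- ===== SOURCE B (Python) =====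
-- from typing import Optional, Tuple
--
-- _STREAM_WORDS = {"on", "off", "true", "false", "y", "n", "1", "0"}
-- _LIVE_WORDS = {"live", "nolive"}
--
-- def _parse_stream_args(tokens: list[str]) -> Tuple[Optional[str], Optional[str]]:
--     """Extract optional stream and live tokens from a token list."""
--     low = [t.lower() for t in tokens]
--     st = next((x for x in reversed(low) if x in _STREAM_WORDS), None)
--     lv = next((x for x in reversed(low) if x in _LIVE_WORDS), None)
--     return st, lv
-- ===== Notes on version B (the rewrite author's own statement) =====
-- stated objective: simpler
-- what changed: Replaces the single fused loop that updates two mutable flags in place by lowercasing once and doing two independent reverse searches (last match per category) with next(...,None).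
import Mathlib
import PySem

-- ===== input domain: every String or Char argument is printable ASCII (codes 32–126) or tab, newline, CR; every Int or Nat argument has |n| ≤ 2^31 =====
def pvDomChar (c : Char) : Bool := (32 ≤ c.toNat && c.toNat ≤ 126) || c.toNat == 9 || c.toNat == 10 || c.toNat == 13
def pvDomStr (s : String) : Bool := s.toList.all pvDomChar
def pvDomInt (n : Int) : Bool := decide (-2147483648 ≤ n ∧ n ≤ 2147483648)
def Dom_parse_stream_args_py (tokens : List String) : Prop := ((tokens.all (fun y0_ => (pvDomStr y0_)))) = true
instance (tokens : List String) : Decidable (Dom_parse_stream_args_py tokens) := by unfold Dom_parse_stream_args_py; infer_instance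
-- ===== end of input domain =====

-- B replaces A's single fused loop (two mutable flags updated in place) by one lowercasing
-- pass and two independent reverse searches for the last match of each category ('simpler').

-- ===== PORT A =====
-- one loop body step: t.lower(), the nested membership tests, update st or lv
def pvStepA (acc : Option String × Option String) (t : String) : Option String × Option String :=
  let tl := PySem.Str.lower t
  if tl ∈ (["on", "off", "true", "false", "live", "nolive", "y", "n", "1", "0"] : List String) then
    if tl ∈ (["live", "nolive"] : List String) then (acc.1, some tl) else (some tl, acc.2)
  else acc

def parse_stream_args_py (tokens : List String) : Option String × Option String :=
  tokens.foldl pvStepA (none, none)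

-- ===== PORT B =====
def pvStreamWords : List String := ["on", "off", "true", "false", "y", "n", "1", "0"]
def pvLiveWords : List String := ["live", "nolive"]

def parse_stream_args_py_alt (tokens : List String) : Option String × Option String :=
  let low := tokens.map PySem.Str.lower
  (low.reverse.find? (fun x => x ∈ pvStreamWords),
   low.reverse.find? (fun x => x ∈ pvLiveWords))

-- ===== PRECONDITION & SPEC =====
def Spec_parse_stream_args_py (tokens : List String) (out : Option String × Option String) : Prop := out = parse_stream_args_py_alt tokens
instance (tokens : List String) (out : Option String × Option String) : Decidable (Spec_parse_stream_args_py tokens out) := by unfold Spec_parse_stream_args_py; infer_instance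

-- ===== CLAIM (what is proved, stated in full; the proofs are below) =====
def Claim_equal_parse_stream_args_py : Prop := ∀ (tokens : List String), Dom_parse_stream_args_py tokens → Spec_parse_stream_args_py tokens (parse_stream_args_py tokens)

-- ===== LEMMAS AND PROOFS =====

-- the loop step's effect on each component is "the singleton reverse search, falling back to the accumulator"
theorem pvStepA_eq (acc : Option String × Option String) (t : String) :
    pvStepA acc t =
      ((if (PySem.Str.lower t) ∈ pvStreamWords then some (PySem.Str.lower t) else none).or acc.1,
       (if (PySem.Str.lower t) ∈ pvLiveWords then some (PySem.Str.lower t) else none).or acc.2) := by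
  unfold pvStepA pvStreamWords pvLiveWords
  generalize PySem.Str.lower t = tl
  by_cases hL : tl ∈ (["live", "nolive"] : List String)
  · simp only [List.mem_cons, List.not_mem_nil, or_false] at hL
    rcases hL with rfl | rfl <;> simp
  · by_cases hS : tl ∈ (["on", "off", "true", "false", "y", "n", "1", "0"] : List String)
    · have hB : tl ∈ (["on", "off", "true", "false", "live", "nolive", "y", "n", "1", "0"] : List String) := by
        simp only [List.mem_cons, List.not_mem_nil, or_false] at hS ⊢
        tauto
      simp [hB, hL, hS]
    · have hB : tl ∉ (["on", "off", "true", "false", "live", "nolive", "y", "n", "1", "0"] : List String) := by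
        simp only [List.mem_cons, List.not_mem_nil, or_false] at hS hL ⊢
        tauto
      simp only [List.mem_cons, List.not_mem_nil, or_false] at hL
      simp [hB, hS, hL]

-- loop invariant: the fold from any accumulator = reverse searches falling back to the accumulator
theorem pvFold_eq (ts : List String) : ∀ (st lv : Option String),
    ts.foldl pvStepA (st, lv) =
      (((ts.map PySem.Str.lower).reverse.find? (fun x => x ∈ pvStreamWords)).or st,
       ((ts.map PySem.Str.lower).reverse.find? (fun x => x ∈ pvLiveWords)).or lv) := by
  induction ts with
  | nil => intro st lv; simp
  | cons t ts ih =>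
    intro st lv
    rw [List.foldl_cons, pvStepA_eq, ih]
    simp only [List.map_cons, List.reverse_cons, List.find?_append, Option.or_assoc]
    congr 1 <;> · congr 1; simp [List.find?]; split_ifs <;> simp_all

-- ===== VERDICT (by name: the statement is the Claim_ definition above) =====
theorem parse_stream_args_py_spec : Claim_equal_parse_stream_args_py := by
  intro tokens _
  unfold Spec_parse_stream_args_py parse_stream_args_py parse_stream_args_py_alt
  rw [pvFold_eq]
  simp
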